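-- pv_equiv track=rewrite | github.com/richardangell/advent-of-code-2021 | Day_05/puzzle_2.py | convert_coord_pair_to_counter
-- ===== SOURCE A (Python) =====
-- from collections import Counter
-- import typing
--
-- def convert_coord_pair_to_counter(coord_pair: list[tuple[int, ...]]) -> typing.Counter:
--     """Function to convert a list of a pair of tuples giving
--     start and end coords to a Counter for each coordinate.
--     """
--
--     coord_counter: typing.Counter = Counter()
--
--     start_coord = coord_pair[0]
--     end_coord = coord_pair[1]
--
--     if start_coord[0] < end_coord[0]:
--
--         x_step = 1
--
--     else:
--
--         x_step = -1
--
--     if start_coord[1] < end_coord[1]: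
--
--         y_step = 1
--
--     else:
--
--         y_step = -1
--
--     if start_coord[0] == end_coord[0]:
--
--         for y_coord in range(start_coord[1], end_coord[1] + y_step, y_step):
--
--             coord_counter[(start_coord[0], y_coord)] = 1
--
--     elif start_coord[1] == end_coord[1]:
--
--         for x_coord in range(start_coord[0], end_coord[0] + x_step, x_step):
--
--             coord_counter[(x_coord, start_coord[1])] = 1
--
--     elif abs(start_coord[0] - end_coord[0]) == abs(start_coord[1] - end_coord[1]):
--
--         for x_coord, y_coord in zip(
--             range(start_coord[0], end_coord[0] + x_step, x_step),
--             range(start_coord[1], end_coord[1] + y_step, y_step),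
--         ):
--
--             coord_counter[(x_coord, y_coord)] = 1
--
--     else:
--
--         raise ValueError(f"diagonal coord pair without gradient 1 or -1; {coord_pair}")
--
--     return coord_counter
-- ===== SOURCE B (Python) =====
-- from collections import Counter
-- import typing
--
--
-- def convert_coord_pair_to_counter(coord_pair: list[tuple[int, ...]]) -> typing.Counter:
--     """Validate up front, then walk BACKWARD from the end point toward the
--     start point (while-loop terminated by reaching the start), collecting the
--     points in reverse; the Counter is built in one shot from the reversed
--     list via dict.fromkeys instead of per-point writes."""
--
--     start = coord_pair[0]
--     end = coord_pair[1]
--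
--     dx = end[0] - start[0]
--     dy = end[1] - start[1]
--
--     if dx != 0 and dy != 0 and abs(dx) != abs(dy):
--         raise ValueError(f"diagonal coord pair without gradient 1 or -1; {coord_pair}")
--
--     # steps pointing from end back toward start
--     bx = (start[0] > end[0]) - (start[0] < end[0])
--     by = (start[1] > end[1]) - (start[1] < end[1])
--
--     x, y = end[0], end[1]
--     backwards = []
--     while (x, y) != (start[0], start[1]):
--         backwards.append((x, y))
--         x += bx
--         y += by
--     backwards.append((x, y))
--
--     return Counter(dict.fromkeys(reversed(backwards), 1))
-- ===== Notes on version B (the rewrite author's own statement) =====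
-- stated objective: alternative
-- what changed: Instead of three branch-specific forward loops each writing into a Counter, B validates first, walks backward from the end point to the start point accumulating the points in reverse into a plain list, and builds the Counter in one shot from the reversed list with dict.fromkeys.
import Mathlib
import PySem

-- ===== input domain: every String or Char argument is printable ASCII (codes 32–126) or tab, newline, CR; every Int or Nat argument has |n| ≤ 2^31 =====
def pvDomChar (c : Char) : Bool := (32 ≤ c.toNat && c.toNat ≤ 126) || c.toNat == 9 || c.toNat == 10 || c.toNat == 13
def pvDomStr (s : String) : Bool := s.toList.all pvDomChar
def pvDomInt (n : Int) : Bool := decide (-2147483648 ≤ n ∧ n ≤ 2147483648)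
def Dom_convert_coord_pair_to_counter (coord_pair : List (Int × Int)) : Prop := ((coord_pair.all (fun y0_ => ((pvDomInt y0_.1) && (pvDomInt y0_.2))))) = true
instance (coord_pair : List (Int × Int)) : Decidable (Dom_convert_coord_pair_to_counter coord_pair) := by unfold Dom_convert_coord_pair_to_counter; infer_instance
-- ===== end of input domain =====

-- B validates first, walks backward from the end point to the start point collecting points,
-- and builds the counter in one shot from the reversed list; objective: alternative decomposition.


-- ===== PORT A =====
-- Literal port of A; the IndexError (fewer than 2 coords) and the ValueError branch
-- return [] here and are excluded by Pre_.
def convert_coord_pair_to_counter (coord_pair : List (Int × Int)) : List (Int × Int × Int) :=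
  match PySem.List.pyGet? coord_pair 0, PySem.List.pyGet? coord_pair 1 with
  | some start_coord, some end_coord =>
    let x_step : Int := if start_coord.1 < end_coord.1 then 1 else -1
    let y_step : Int := if start_coord.2 < end_coord.2 then 1 else -1
    let coord_counter : PySem.Dict (Int × Int) Int :=
      if start_coord.1 = end_coord.1 then
        (PySem.List.pyRange start_coord.2 (end_coord.2 + y_step) y_step).foldl
          (fun d y_coord => d.insert (start_coord.1, y_coord) 1) PySem.Dict.empty
      else if start_coord.2 = end_coord.2 then
        (PySem.List.pyRange start_coord.1 (end_coord.1 + x_step) x_step).foldl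
          (fun d x_coord => d.insert (x_coord, start_coord.2) 1) PySem.Dict.empty
      else if (start_coord.1 - end_coord.1).natAbs = (start_coord.2 - end_coord.2).natAbs then
        ((PySem.List.pyRange start_coord.1 (end_coord.1 + x_step) x_step).zip
          (PySem.List.pyRange start_coord.2 (end_coord.2 + y_step) y_step)).foldl
          (fun d p => d.insert p 1) PySem.Dict.empty
      else PySem.Dict.empty  -- ValueError: outside Pre_
    coord_counter.items.map (fun p => (p.1.1, p.1.2, p.2))
  | _, _ => []  -- IndexError: outside Pre_

-- ===== PORT B =====
-- '(a > b) - (a < b)' from Source B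
def pySign (n : Int) : Int := (if 0 < n then 1 else 0) - (if n < 0 then 1 else 0)

-- the while loop of Source B, walking backward from the end point; the fuel is the exact
-- number of iterations the while guard admits on validated input (a totality guard only)
def walkBack (x y bx byy : Int) : Nat → List (Int × Int)
  | 0 => [(x, y)]
  | n + 1 => (x, y) :: walkBack (x + bx) (y + byy) bx byy n

def convert_coord_pair_to_counter_alt (coord_pair : List (Int × Int)) : List (Int × Int × Int) :=
  match PySem.List.pyGet? coord_pair 0 with
  | none => []  -- IndexError: outside Pre_
  | some start_coord =>
  match PySem.List.pyGet? coord_pair 1 with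
  | none => []  -- IndexError: outside Pre_
  | some end_coord =>
    let dx : Int := end_coord.1 - start_coord.1
    let dy : Int := end_coord.2 - start_coord.2
    if dx ≠ 0 ∧ dy ≠ 0 ∧ dx.natAbs ≠ dy.natAbs then []  -- ValueError: outside Pre_
    else
      let bx := pySign (start_coord.1 - end_coord.1)
      let byy := pySign (start_coord.2 - end_coord.2)
      let backwards := walkBack end_coord.1 end_coord.2 bx byy (max dx.natAbs dy.natAbs)
      -- Counter(dict.fromkeys(reversed(backwards), 1))
      let coord_counter : PySem.Dict (Int × Int) Int :=
        backwards.reverse.foldl (fun d p => d.insert p 1) PySem.Dict.empty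
      coord_counter.items.map (fun p => (p.1.1, p.1.2, p.2))

-- ===== PRECONDITION & SPEC =====
-- Pre_ excludes exactly the inputs where A raises: fewer than two coordinate pairs
-- (IndexError) and non-axis-aligned pairs without gradient ±1 (ValueError).
def Pre_convert_coord_pair_to_counter (coord_pair : List (Int × Int)) : Prop :=
  2 ≤ coord_pair.length ∧
    (let s := coord_pair.getD 0 (0, 0)
     let e := coord_pair.getD 1 (0, 0)
     s.1 = e.1 ∨ s.2 = e.2 ∨ (s.1 - e.1).natAbs = (s.2 - e.2).natAbs)
instance (coord_pair : List (Int × Int)) : Decidable (Pre_convert_coord_pair_to_counter coord_pair) := by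
  unfold Pre_convert_coord_pair_to_counter; infer_instance

def pvWitness_convert_coord_pair_to_counter : (List (Int × Int)) := [(1, 1), (3, 3)]

def Spec_convert_coord_pair_to_counter (coord_pair : List (Int × Int)) (out : List (Int × Int × Int)) : Prop := out = convert_coord_pair_to_counter_alt coord_pair
instance (coord_pair : List (Int × Int)) (out : List (Int × Int × Int)) : Decidable (Spec_convert_coord_pair_to_counter coord_pair out) := by unfold Spec_convert_coord_pair_to_counter; infer_instance

-- ===== CLAIM (what is proved, stated in full; the proofs are below) =====
def Claim_equal_convert_coord_pair_to_counter : Prop := ∀ (coord_pair : List (Int × Int)), Dom_convert_coord_pair_to_counter coord_pair → Pre_convert_coord_pair_to_counter coord_pair → Spec_convert_coord_pair_to_counter coord_pair (convert_coord_pair_to_counter coord_pair)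

-- ===== LEMMAS AND PROOFS =====

theorem walkBack_snoc (bx byy : Int) (n : Nat) : ∀ (x y : Int),
    walkBack x y bx byy (n + 1)
      = walkBack x y bx byy n ++ [(x + (n + 1 : Nat) * bx, y + (n + 1 : Nat) * byy)] := by
  induction n with
  | zero =>
    intro x y
    simp [walkBack]
  | succ n ih =>
    intro x y
    rw [show walkBack x y bx byy (n + 2)
          = (x, y) :: walkBack (x + bx) (y + byy) bx byy (n + 1) from rfl, ih]
    have h1 : x + bx + ((n + 1 : Nat) : Int) * bx = x + ((n + 1 + 1 : Nat) : Int) * bx := by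
      push_cast; ring
    have h2 : y + byy + ((n + 1 : Nat) : Int) * byy = y + ((n + 1 + 1 : Nat) : Int) * byy := by
      push_cast; ring
    rw [h1, h2,
      show walkBack x y bx byy (n + 1) = (x, y) :: walkBack (x + bx) (y + byy) bx byy n from rfl]
    simp

theorem walkBack_reverse (bx byy : Int) (n : Nat) : ∀ (x y : Int),
    (walkBack x y bx byy n).reverse
      = walkBack (x + (n : Int) * bx) (y + (n : Int) * byy) (-bx) (-byy) n := by
  induction n with
  | zero => intro x y; simp [walkBack]
  | succ n ih =>
    intro x y
    have hL : walkBack x y bx byy (n + 1) = (x, y) :: walkBack (x + bx) (y + byy) bx byy n := rfl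
    rw [hL, List.reverse_cons, ih, walkBack_snoc]
    have h1 : x + bx + (n : Int) * bx = x + ((n + 1 : Nat) : Int) * bx := by push_cast; ring
    have h2 : y + byy + (n : Int) * byy = y + ((n + 1 : Nat) : Int) * byy := by push_cast; ring
    have h3 : x + ((n + 1 : Nat) : Int) * bx + ((n + 1 : Nat) : Int) * (-bx) = x := by ring
    have h4 : y + ((n + 1 : Nat) : Int) * byy + ((n + 1 : Nat) : Int) * (-byy) = y := by ring
    rw [h1, h2, h3, h4]

theorem walkBack_eq_map (bx byy x y : Int) : ∀ (n : Nat),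
    walkBack x y bx byy n
      = (List.range (n + 1)).map (fun (i : Nat) => (x + (i : Int) * bx, y + (i : Int) * byy)) := by
  intro n
  induction n with
  | zero => simp [walkBack]
  | succ n ih =>
    rw [walkBack_snoc, ih, show List.range (n + 1 + 1) = List.range (n + 1) ++ [n + 1]
        from List.range_succ, List.map_append]
    simp

theorem main_eq (s e : Int × Int)
    (hcond : s.1 = e.1 ∨ s.2 = e.2 ∨ (s.1 - e.1).natAbs = (s.2 - e.2).natAbs)
    (t : List (Int × Int)) :
    convert_coord_pair_to_counter (s :: e :: t)
      = convert_coord_pair_to_counter_alt (s :: e :: t) := by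
  have hg1 : PySem.List.pyGet? (s :: e :: t) 1 = some e := by
    rw [show (1:Int) = ((1:Nat):Int) from rfl]
    simp
  simp only [convert_coord_pair_to_counter, convert_coord_pair_to_counter_alt,
    PySem.List.pyGet?_zero_cons, hg1]
  have hguard : ¬ (e.1 - s.1 ≠ 0 ∧ e.2 - s.2 ≠ 0 ∧ (e.1 - s.1).natAbs ≠ (e.2 - s.2).natAbs) := by
    rcases hcond with h | h | h <;> intro ⟨h1, h2, h3⟩ <;> omega
  rw [if_neg hguard]
  by_cases hx : s.1 = e.1
  · have hbx : pySign (s.1 - e.1) = 0 := by simp only [pySign]; split_ifs <;> omega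
    by_cases hy : s.2 < e.2
    · -- vertical, upwards
      have hby : pySign (s.2 - e.2) = -1 := by simp only [pySign]; split_ifs <;> omega
      have hmax : max (e.1 - s.1).natAbs (e.2 - s.2).natAbs = (e.2 - s.2).toNat := by omega
      simp only [if_pos hx, if_pos hy, hbx, hby, hmax]
      rw [walkBack_reverse]
      have h1 : e.1 + ((e.2 - s.2).toNat : Int) * 0 = s.1 := by rw [mul_zero, add_zero]; omega
      have h2 : e.2 + ((e.2 - s.2).toNat : Int) * (-1) = s.2 := by rw [mul_neg_one]; omega
      rw [h1, h2, neg_zero, neg_neg, walkBack_eq_map, List.foldl_map,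
        PySem.List.pyRange_one,
        show (e.2 + 1 - s.2).toNat = (e.2 - s.2).toNat + 1 by omega, List.foldl_map]
      simp only [mul_zero, add_zero, mul_one]
    · by_cases hy0 : s.2 = e.2
      · -- single point
        have hby : pySign (s.2 - e.2) = 0 := by simp only [pySign]; split_ifs <;> omega
        have hmax : max (e.1 - s.1).natAbs (e.2 - s.2).natAbs = 0 := by omega
        simp only [if_pos hx, if_neg hy, hbx, hby, hmax]
        rw [show e.2 + -1 = e.2 - 1 by ring, ← hy0,
          PySem.List.pyRange_neg_one_cons (by omega),
          PySem.List.pyRange_neg_one_eq_nil (by omega)]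
        simp [walkBack, hx]
      · -- vertical, downwards
        have hby : pySign (s.2 - e.2) = 1 := by simp only [pySign]; split_ifs <;> omega
        have hmax : max (e.1 - s.1).natAbs (e.2 - s.2).natAbs = (s.2 - e.2).toNat := by omega
        simp only [if_pos hx, if_neg hy, hbx, hby, hmax]
        rw [walkBack_reverse]
        have h1 : e.1 + ((s.2 - e.2).toNat : Int) * 0 = s.1 := by rw [mul_zero, add_zero]; omega
        have h2 : e.2 + ((s.2 - e.2).toNat : Int) * 1 = s.2 := by rw [mul_one]; omega
        rw [h1, h2, neg_zero, walkBack_eq_map, List.foldl_map,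
          show e.2 + -1 = e.2 - 1 by ring, PySem.List.pyRange_neg_one,
          show (s.2 - (e.2 - 1)).toNat = (s.2 - e.2).toNat + 1 by omega, List.foldl_map]
        simp only [mul_zero, add_zero, mul_neg_one, ← sub_eq_add_neg]
  · have hdx : e.1 - s.1 ≠ 0 := by omega
    by_cases hy2 : s.2 = e.2
    · -- horizontal
      have hby : pySign (s.2 - e.2) = 0 := by simp only [pySign]; split_ifs <;> omega
      by_cases hxlt : s.1 < e.1
      · have hbx : pySign (s.1 - e.1) = -1 := by simp only [pySign]; split_ifs <;> omega
        have hmax : max (e.1 - s.1).natAbs (e.2 - s.2).natAbs = (e.1 - s.1).toNat := by omega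
        simp only [if_neg hx, if_pos hy2, if_pos hxlt, hbx, hby, hmax]
        rw [walkBack_reverse]
        have h1 : e.1 + ((e.1 - s.1).toNat : Int) * (-1) = s.1 := by rw [mul_neg_one]; omega
        have h2 : e.2 + ((e.1 - s.1).toNat : Int) * 0 = s.2 := by rw [mul_zero, add_zero]; omega
        rw [h1, h2, neg_zero, neg_neg, walkBack_eq_map, List.foldl_map,
          PySem.List.pyRange_one,
          show (e.1 + 1 - s.1).toNat = (e.1 - s.1).toNat + 1 by omega, List.foldl_map]
        simp only [mul_zero, add_zero, mul_one]
      · have hbx : pySign (s.1 - e.1) = 1 := by simp only [pySign]; split_ifs <;> omega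
        have hmax : max (e.1 - s.1).natAbs (e.2 - s.2).natAbs = (s.1 - e.1).toNat := by omega
        simp only [if_neg hx, if_pos hy2, if_neg hxlt, hbx, hby, hmax]
        rw [walkBack_reverse]
        have h1 : e.1 + ((s.1 - e.1).toNat : Int) * 1 = s.1 := by rw [mul_one]; omega
        have h2 : e.2 + ((s.1 - e.1).toNat : Int) * 0 = s.2 := by rw [mul_zero, add_zero]; omega
        rw [h1, h2, neg_zero, walkBack_eq_map, List.foldl_map,
          show e.1 + -1 = e.1 - 1 by ring, PySem.List.pyRange_neg_one,
          show (s.1 - (e.1 - 1)).toNat = (s.1 - e.1).toNat + 1 by omega, List.foldl_map]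
        simp only [mul_zero, add_zero, mul_neg_one, ← sub_eq_add_neg]
    · -- diagonal
      have habs : (s.1 - e.1).natAbs = (s.2 - e.2).natAbs := by
        rcases hcond with h | h | h
        · exact absurd h hx
        · exact absurd h hy2
        · exact h
      by_cases hxlt : s.1 < e.1 <;> by_cases hylt : s.2 < e.2
      · have hbx : pySign (s.1 - e.1) = -1 := by simp only [pySign]; split_ifs <;> omega
        have hby : pySign (s.2 - e.2) = -1 := by simp only [pySign]; split_ifs <;> omega
        have hmax : max (e.1 - s.1).natAbs (e.2 - s.2).natAbs = (e.1 - s.1).toNat := by omega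
        simp only [if_neg hx, if_neg hy2, if_pos habs, if_pos hxlt, if_pos hylt, hbx, hby, hmax]
        rw [walkBack_reverse]
        have h1 : e.1 + ((e.1 - s.1).toNat : Int) * (-1) = s.1 := by rw [mul_neg_one]; omega
        have h2 : e.2 + ((e.1 - s.1).toNat : Int) * (-1) = s.2 := by rw [mul_neg_one]; omega
        rw [h1, h2, neg_neg, walkBack_eq_map, List.foldl_map,
          PySem.List.pyRange_one (a := s.1), PySem.List.pyRange_one (a := s.2),
          show (e.1 + 1 - s.1).toNat = (e.1 - s.1).toNat + 1 by omega,
          show (e.2 + 1 - s.2).toNat = (e.1 - s.1).toNat + 1 by omega,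
          List.zip_map', List.foldl_map]
        simp only [mul_one]
      · have hbx : pySign (s.1 - e.1) = -1 := by simp only [pySign]; split_ifs <;> omega
        have hby : pySign (s.2 - e.2) = 1 := by simp only [pySign]; split_ifs <;> omega
        have hmax : max (e.1 - s.1).natAbs (e.2 - s.2).natAbs = (e.1 - s.1).toNat := by omega
        simp only [if_neg hx, if_neg hy2, if_pos habs, if_pos hxlt, if_neg hylt, hbx, hby, hmax]
        rw [walkBack_reverse]
        have h1 : e.1 + ((e.1 - s.1).toNat : Int) * (-1) = s.1 := by rw [mul_neg_one]; omega
        have h2 : e.2 + ((e.1 - s.1).toNat : Int) * 1 = s.2 := by rw [mul_one]; omega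
        rw [h1, h2, neg_neg, walkBack_eq_map, List.foldl_map,
          PySem.List.pyRange_one, show e.2 + -1 = e.2 - 1 by ring, PySem.List.pyRange_neg_one,
          show (e.1 + 1 - s.1).toNat = (e.1 - s.1).toNat + 1 by omega,
          show (s.2 - (e.2 - 1)).toNat = (e.1 - s.1).toNat + 1 by omega,
          List.zip_map', List.foldl_map]
        simp only [mul_one, mul_neg_one, ← sub_eq_add_neg]
      · have hbx : pySign (s.1 - e.1) = 1 := by simp only [pySign]; split_ifs <;> omega
        have hby : pySign (s.2 - e.2) = -1 := by simp only [pySign]; split_ifs <;> omega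
        have hmax : max (e.1 - s.1).natAbs (e.2 - s.2).natAbs = (s.1 - e.1).toNat := by omega
        simp only [if_neg hx, if_neg hy2, if_pos habs, if_neg hxlt, if_pos hylt, hbx, hby, hmax]
        rw [walkBack_reverse]
        have h1 : e.1 + ((s.1 - e.1).toNat : Int) * 1 = s.1 := by rw [mul_one]; omega
        have h2 : e.2 + ((s.1 - e.1).toNat : Int) * (-1) = s.2 := by rw [mul_neg_one]; omega
        rw [h1, h2, neg_neg, walkBack_eq_map, List.foldl_map,
          show e.1 + -1 = e.1 - 1 by ring, PySem.List.pyRange_neg_one, PySem.List.pyRange_one,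
          show (s.1 - (e.1 - 1)).toNat = (s.1 - e.1).toNat + 1 by omega,
          show (e.2 + 1 - s.2).toNat = (s.1 - e.1).toNat + 1 by omega,
          List.zip_map', List.foldl_map]
        simp only [mul_one, mul_neg_one, ← sub_eq_add_neg]
      · have hbx : pySign (s.1 - e.1) = 1 := by simp only [pySign]; split_ifs <;> omega
        have hby : pySign (s.2 - e.2) = 1 := by simp only [pySign]; split_ifs <;> omega
        have hmax : max (e.1 - s.1).natAbs (e.2 - s.2).natAbs = (s.1 - e.1).toNat := by omega
        simp only [if_neg hx, if_neg hy2, if_pos habs, if_neg hxlt, if_neg hylt, hbx, hby, hmax]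
        rw [walkBack_reverse]
        have h1 : e.1 + ((s.1 - e.1).toNat : Int) * 1 = s.1 := by rw [mul_one]; omega
        have h2 : e.2 + ((s.1 - e.1).toNat : Int) * 1 = s.2 := by rw [mul_one]; omega
        rw [h1, h2, walkBack_eq_map, List.foldl_map,
          show e.1 + -1 = e.1 - 1 by ring, show e.2 + -1 = e.2 - 1 by ring,
          PySem.List.pyRange_neg_one (a := s.1), PySem.List.pyRange_neg_one (a := s.2),
          show (s.1 - (e.1 - 1)).toNat = (s.1 - e.1).toNat + 1 by omega,
          show (s.2 - (e.2 - 1)).toNat = (s.1 - e.1).toNat + 1 by omega,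
          List.zip_map', List.foldl_map]
        simp only [mul_neg_one, ← sub_eq_add_neg]


-- ===== VERDICT =====
theorem convert_coord_pair_to_counter_spec : Claim_equal_convert_coord_pair_to_counter := by
  intro cp _ hpre
  obtain ⟨hlen, hcond⟩ := hpre
  match cp with
  | s :: e :: t =>
    simp only [List.getD_cons_zero, List.getD_cons_succ] at hcond
    exact main_eq s e hcond t
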